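-- pv_equiv track=rewrite | github.com/cod2048/Algorithm_auto | 프로그래머스/0/181894. 2의 영역/2의 영역.py | solution
-- ===== SOURCE A (Python) =====
-- def solution(arr):
--     answer = [-1]
--     start = 0
--     end = len(arr) - 1
--     for i in range(len(arr)):
--         if arr[i] == 2:
--             break
--         start += 1
--
--
--     for j in range(len(arr)-1, -1, -1):
--         if arr[j] == 2:
--             break
--         end -= 1
--
--     if start == len(arr) and end == -1:
--         return answer
--
--     else:
--         answer.pop()
--         answer = arr[start:end + 1]
--
--     return answer
-- ===== SOURCE B (Python) =====
-- def solution(arr):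
--     twos = [i for i, x in enumerate(arr) if x == 2]
--     if not twos:
--         return [-1]
--     return arr[twos[0]:twos[-1] + 1]
-- ===== Notes on version B (the rewrite author's own statement) =====
-- stated objective: idiomatic
-- what changed: Replaces A's two opposite-direction index scans with break/counter bookkeeping by a single enumerate pass collecting all positions of 2, then slicing between the first and last collected position.
import Mathlib
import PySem

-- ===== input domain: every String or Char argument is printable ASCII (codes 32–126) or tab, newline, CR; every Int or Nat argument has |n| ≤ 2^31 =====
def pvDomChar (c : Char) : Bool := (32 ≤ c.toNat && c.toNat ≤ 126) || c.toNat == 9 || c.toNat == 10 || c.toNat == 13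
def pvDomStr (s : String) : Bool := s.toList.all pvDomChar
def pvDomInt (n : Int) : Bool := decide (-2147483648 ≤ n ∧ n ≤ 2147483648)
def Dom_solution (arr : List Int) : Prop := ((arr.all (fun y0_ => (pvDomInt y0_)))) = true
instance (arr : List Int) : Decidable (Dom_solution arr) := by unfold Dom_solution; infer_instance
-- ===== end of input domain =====

-- B replaces A's two opposite-direction break scans with one enumerate pass
-- collecting the positions of 2, then slicing between the first and last (idiomatic).


-- ===== PORT A =====
-- A's forward loop: walk the elements in order, counting until the first 2 (break).
def aScan : List Int → Nat
  | [] => 0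
  | x :: t => if x = 2 then 0 else aScan t + 1

-- A's backward loop walks the elements in reverse order decrementing `end`,
-- so end = len-1 minus the number of trailing non-2 elements scanned.
def solution (arr : List Int) : List Int :=
  let start : Nat := aScan arr
  let endIdx : Int := (arr.length : Int) - 1 - (aScan arr.reverse : Int)
  if start = arr.length ∧ endIdx = -1 then [-1]
  else PySem.List.slice arr (some (start : Int)) (some (endIdx + 1))

-- ===== PORT B =====
def solution_alt (arr : List Int) : List Int :=
  let twos : List Int := ((PySem.List.enumerate arr).filter (fun p => p.2 == 2)).map (·.1)
  match twos with
  | [] => [-1]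
  | i :: rest => PySem.List.slice arr (some i) (some ((i :: rest).getLast (by simp) + 1))

-- ===== PRECONDITION & SPEC =====
def Spec_solution (arr : List Int) (out : List Int) : Prop := out = solution_alt arr
instance (arr : List Int) (out : List Int) : Decidable (Spec_solution arr out) := by unfold Spec_solution; infer_instance

-- ===== CLAIM (what is proved, stated in full; the proofs are below) =====
def Claim_equal_solution : Prop := ∀ (arr : List Int), Dom_solution arr → Spec_solution arr (solution arr)

-- ===== LEMMAS AND PROOFS =====

def twosF (arr : List Int) (s : Int) : List Int :=
  ((PySem.List.enumerate arr s).filter (fun p => p.2 == 2)).map (·.1)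

lemma twosF_cons (x : Int) (t : List Int) (s : Int) :
    twosF (x :: t) s = if x = 2 then s :: twosF t (s + 1) else twosF t (s + 1) := by
  by_cases h : x = 2 <;> simp [twosF, PySem.List.enumerate_cons, h]

lemma aScan_le (arr : List Int) : aScan arr ≤ arr.length := by
  induction arr with
  | nil => simp [aScan]
  | cons x t ih => simp only [aScan, List.length_cons]; split_ifs <;> omega

lemma aScan_eq_length_iff (arr : List Int) : aScan arr = arr.length ↔ 2 ∉ arr := by
  induction arr with
  | nil => simp [aScan]
  | cons x t ih =>
    simp only [aScan, List.length_cons, List.mem_cons]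
    have := aScan_le t
    split_ifs with hx
    · simp [hx]
    · constructor
      · intro he
        push Not
        exact ⟨fun h2 => hx h2.symm, ih.mp (by omega)⟩
      · intro hn
        push Not at hn
        have := ih.mpr hn.2
        omega

lemma twosF_empty_of_not_mem (arr : List Int) (s : Int) (h : 2 ∉ arr) : twosF arr s = [] := by
  induction arr generalizing s with
  | nil => rfl
  | cons x t ih =>
    rw [twosF_cons]
    simp only [List.mem_cons] at h
    push Not at h
    rw [if_neg (fun hx => h.1 hx.symm)]
    exact ih (s + 1) h.2

lemma twosF_head (arr : List Int) (s : Int) (h : 2 ∈ arr) :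
    (twosF arr s).head? = some (s + (aScan arr : Int)) := by
  induction arr generalizing s with
  | nil => simp at h
  | cons x t ih =>
    rw [twosF_cons]
    by_cases hx : x = 2
    · simp [hx, aScan]
    · rw [if_neg hx]
      have ht : 2 ∈ t := by
        rcases List.mem_cons.mp h with h1 | h1
        · exact absurd h1.symm hx
        · exact h1
      rw [ih (s + 1) ht]
      simp only [aScan, if_neg hx]
      push_cast
      ring_nf

lemma twosF_append_singleton (t : List Int) (x : Int) (s : Int) :
    twosF (t ++ [x]) s = twosF t s ++ (if x = 2 then [s + t.length] else []) := by
  induction t generalizing s with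
  | nil =>
    simp only [List.nil_append, twosF_cons]
    split_ifs <;> simp [twosF]
  | cons y u ih =>
    rw [List.cons_append, twosF_cons, twosF_cons, ih (s + 1)]
    split_ifs <;> simp <;> try ring_nf

lemma twosF_getLast (arr : List Int) (s : Int) (h : 2 ∈ arr) :
    (twosF arr s).getLast? = some (s + ((arr.length : Int) - 1 - (aScan arr.reverse : Int))) := by
  induction arr using List.reverseRecOn generalizing s with
  | nil => simp at h
  | append_singleton t x ih =>
    rw [twosF_append_singleton]
    by_cases hx : x = 2
    · rw [if_pos hx]
      subst hx
      simp only [List.reverse_append, List.reverse_singleton, List.singleton_append, aScan,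
        List.length_append, List.length_singleton]
      simp
    · rw [if_neg hx, List.append_nil]
      have ht : 2 ∈ t := by
        rcases List.mem_append.mp h with h1 | h1
        · exact h1
        · simp at h1; exact absurd h1.symm hx
      rw [ih s ht]
      simp only [List.reverse_append, List.reverse_singleton, List.singleton_append, aScan,
        if_neg hx, List.length_append, List.length_singleton]
      push_cast
      ring_nf

-- ===== VERDICT (by name: the statement is the Claim_ definition above) =====
theorem solution_spec : Claim_equal_solution := by
  intro arr _
  show solution arr = solution_alt arr
  have halt : solution_alt arr = (match twosF arr 0 with
      | [] => [-1]
      | i :: rest => PySem.List.slice arr (some i) (some ((i :: rest).getLast (by simp) + 1))) := rfl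
  by_cases h : 2 ∈ arr
  · -- there is a 2: both return the slice between first and last occurrence
    have hhead := twosF_head arr 0 h
    obtain ⟨i, rest, hcons⟩ : ∃ i rest, twosF arr 0 = i :: rest := by
      cases hts : twosF arr 0 with
      | nil => rw [hts] at hhead; simp at hhead
      | cons a b => exact ⟨a, b, rfl⟩
    have hi : i = (aScan arr : Int) := by
      rw [hcons] at hhead; simp at hhead; omega
    have hlast := twosF_getLast arr 0 h
    rw [hcons] at hlast
    have hlast' : (i :: rest).getLast (by simp) =
        (arr.length : Int) - 1 - (aScan arr.reverse : Int) := by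
      have := List.getLast?_eq_some_getLast (l := i :: rest) (by simp)
      rw [this] at hlast
      simp at hlast
      omega
    have hne : aScan arr ≠ arr.length := fun hc => (aScan_eq_length_iff arr).mp hc h
    rw [halt, hcons]
    unfold solution
    rw [if_neg (by intro hc; exact hne hc.1)]
    have hred : (match i :: rest with
        | [] => ([-1] : List Int)
        | i :: rest => PySem.List.slice arr (some i) (some ((i :: rest).getLast (by simp) + 1))) =
        PySem.List.slice arr (some i) (some ((i :: rest).getLast (by simp) + 1)) := rfl
    rw [hred, hlast', hi]
  · -- no 2: A's condition holds, B's list of positions is empty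
    have h1 : aScan arr = arr.length := (aScan_eq_length_iff arr).mpr h
    have h2 : aScan arr.reverse = arr.length := by
      rw [show arr.length = arr.reverse.length by simp]
      exact (aScan_eq_length_iff arr.reverse).mpr (by simpa using h)
    rw [halt, twosF_empty_of_not_mem arr 0 h]
    unfold solution
    rw [if_pos ⟨h1, by rw [h2]; ring⟩]
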